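-- pv_equiv track=rewrite | github.com/ronils/Matrix-and-vectors | Numerical Analysis python.py | numMatrix
-- ===== SOURCE A (Python) =====
-- def numMatrix(m,n,start,step):
--
--     if m <= 0 or n <= 0:
--         return 'Error (zeroMatrix): invalid size'
--     matrix = []
--     for i in range(m):
--         m = []
--         for j in range(n):
--             m = m + [start]
--             start = start+step
--         matrix = matrix + [m]
--
--     return matrix
-- ===== SOURCE B (Python) =====
-- def numMatrix(m, n, start, step):
--     if m <= 0 or n <= 0:
--         return 'Error (zeroMatrix): invalid size'
--     flat = []
--     v = start
--     for _ in range(m * n):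
--         flat.append(v)
--         v = v + step
--     return [flat[i * n:(i + 1) * n] for i in range(m)]
-- ===== Notes on version B (the rewrite author's own statement) =====
-- stated objective: faster
-- what changed: B builds the whole arithmetic sequence once as a flat list with append (keeping the same sequential additions) and then reshapes it into rows by slicing, instead of A's nested loops that rebuild each row and the matrix by repeated list concatenation.
import Mathlib
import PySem

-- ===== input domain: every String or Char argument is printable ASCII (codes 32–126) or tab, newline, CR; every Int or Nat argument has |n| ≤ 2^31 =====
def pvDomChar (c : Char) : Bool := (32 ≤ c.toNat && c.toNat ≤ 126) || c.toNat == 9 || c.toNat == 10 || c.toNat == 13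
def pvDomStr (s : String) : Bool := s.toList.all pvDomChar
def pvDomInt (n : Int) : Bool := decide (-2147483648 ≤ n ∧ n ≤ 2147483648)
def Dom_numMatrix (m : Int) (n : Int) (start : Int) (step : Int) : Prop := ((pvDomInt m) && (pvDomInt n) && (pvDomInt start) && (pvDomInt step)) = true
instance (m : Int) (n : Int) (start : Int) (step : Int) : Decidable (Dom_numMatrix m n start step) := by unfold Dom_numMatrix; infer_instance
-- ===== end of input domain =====

-- B builds the flat arithmetic sequence once (same sequential additions) and reshapes it by slicing,
-- replacing A's nested loops that rebuild rows and matrix by repeated list concatenation (objective: faster).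


-- ===== PORT A =====
-- On m ≤ 0 or n ≤ 0 the Python returns an error STRING (not a matrix); those inputs are outside Pre_.
def numMatrix (m : Int) (n : Int) (start : Int) (step : Int) : List (List Int) :=
  if m ≤ 0 ∨ n ≤ 0 then []
  else
    ((PySem.List.pyRange 0 m 1).foldl
      (fun (st : List (List Int) × Int) _ =>
        let inner := (PySem.List.pyRange 0 n 1).foldl
          (fun (p : List Int × Int) _ => (p.1 ++ [p.2], p.2 + step)) (([] : List Int), st.2)
        (st.1 ++ [inner.1], inner.2))
      (([] : List (List Int)), start)).1

-- ===== PORT B =====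
def numMatrix_alt (m : Int) (n : Int) (start : Int) (step : Int) : List (List Int) :=
  if m ≤ 0 ∨ n ≤ 0 then []
  else
    let flat := ((PySem.List.pyRange 0 (m * n) 1).foldl
      (fun (p : List Int × Int) _ => (p.1 ++ [p.2], p.2 + step)) (([] : List Int), start)).1
    (PySem.List.pyRange 0 m 1).map
      (fun i => PySem.List.slice flat (some (i * n)) (some ((i + 1) * n)))

-- ===== PRECONDITION & SPEC =====
-- Pre_ excludes m ≤ 0 ∨ n ≤ 0, where the Python A returns an error string, not a value of the matrix type.
def Pre_numMatrix (m : Int) (n : Int) (start : Int) (step : Int) : Prop := 0 < m ∧ 0 < n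
instance (m : Int) (n : Int) (start : Int) (step : Int) : Decidable (Pre_numMatrix m n start step) := by unfold Pre_numMatrix; infer_instance
def pvWitness_numMatrix : Int × Int × Int × Int := (2, 3, 5, -1)

def Spec_numMatrix (m : Int) (n : Int) (start : Int) (step : Int) (out : List (List Int)) : Prop := out = numMatrix_alt m n start step
instance (m : Int) (n : Int) (start : Int) (step : Int) (out : List (List Int)) : Decidable (Spec_numMatrix m n start step out) := by unfold Spec_numMatrix; infer_instance

-- ===== CLAIM (what is proved, stated in full; the proofs are below) =====
def Claim_equal_numMatrix : Prop := ∀ (m : Int) (n : Int) (start : Int) (step : Int), Dom_numMatrix m n start step → Pre_numMatrix m n start step → Spec_numMatrix m n start step (numMatrix m n start step)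

-- ===== LEMMAS AND PROOFS =====

-- the arithmetic sequence of k values starting at v with difference `step`
def pvSeq (step : Int) : Nat → Int → List Int
  | 0, _ => []
  | k + 1, v => v :: pvSeq step k (v + step)

-- the matrix of M rows of N values each, rows following on from each other
def pvRows (step : Int) (N : Nat) : Nat → Int → List (List Int)
  | 0, _ => []
  | M + 1, v => pvSeq step N v :: pvRows step N M (v + (N : Int) * step)

theorem pvSeq_length (step : Int) : ∀ (k : Nat) (v : Int), (pvSeq step k v).length = k := by
  intro k
  induction k with
  | zero => intro v; rfl
  | succ k ih => intro v; simp [pvSeq, ih]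

theorem pvSeq_add (step : Int) : ∀ (a b : Nat) (v : Int),
    pvSeq step (a + b) v = pvSeq step a v ++ pvSeq step b (v + (a : Int) * step) := by
  intro a
  induction a with
  | zero => intro b v; simp [pvSeq]
  | succ a ih =>
    intro b v
    have : a + 1 + b = (a + b) + 1 := by omega
    rw [this]
    simp only [pvSeq, ih]
    have : v + step + (a : Int) * step = v + ((a : Nat) + 1 : Int) * step := by push_cast; ring
    rw [List.cons_append, this]
    push_cast
    ring_nf

theorem pvFold_seq (step : Int) {α : Type} : ∀ (l : List α) (st : List Int × Int),
    l.foldl (fun (p : List Int × Int) _ => (p.1 ++ [p.2], p.2 + step)) st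
      = (st.1 ++ pvSeq step l.length st.2, st.2 + (l.length : Int) * step) := by
  intro l
  induction l with
  | nil => intro st; simp [pvSeq]
  | cons h t ih =>
    intro st
    rw [List.foldl_cons, ih]
    rw [Prod.mk.injEq]
    refine ⟨by simp [pvSeq], ?_⟩
    simp; ring

theorem pvFold_rows (step n : Int) {α : Type} : ∀ (l : List α) (st : List (List Int) × Int),
    l.foldl (fun (st : List (List Int) × Int) _ =>
        let inner := (PySem.List.pyRange 0 n 1).foldl
          (fun (p : List Int × Int) _ => (p.1 ++ [p.2], p.2 + step)) (([] : List Int), st.2)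
        (st.1 ++ [inner.1], inner.2)) st
      = (st.1 ++ pvRows step n.toNat l.length st.2, st.2 + (l.length : Int) * ((n.toNat : Int) * step)) := by
  intro l
  induction l with
  | nil => intro st; simp [pvRows]
  | cons h t ih =>
    intro st
    have hlen : (PySem.List.pyRange 0 n 1).length = n.toNat := by
      rw [PySem.List.length_pyRange_one]; simp
    rw [List.foldl_cons, ih]
    simp only [pvFold_seq, hlen]
    rw [Prod.mk.injEq]
    refine ⟨by simp [pvRows], ?_⟩
    simp; ring

-- A's nested fold computes pvRows
theorem pvA_eq_rows (m n start step : Int) (hm : 0 < m) (hn : 0 < n) :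
    numMatrix m n start step = pvRows step n.toNat m.toNat start := by
  unfold numMatrix
  rw [if_neg (by omega)]
  have hlen : (PySem.List.pyRange 0 m 1).length = m.toNat := by
    rw [PySem.List.length_pyRange_one]; simp
  rw [pvFold_rows, hlen]
  simp

-- taking one row out of the flat sequence
theorem pvSeq_chunk (step : Int) (N r : Nat) (w : Int) :
    (pvSeq step (N + r) w).take N = pvSeq step N w := by
  rw [pvSeq_add]
  exact List.take_left' (pvSeq_length step N w)

theorem pvSeq_drop (step : Int) (a b : Nat) (w : Int) :
    (pvSeq step (a + b) w).drop a = pvSeq step b (w + (a : Int) * step) := by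
  rw [pvSeq_add]
  exact List.drop_left' (pvSeq_length step a w)

-- pvRows as a map over row indices
theorem pvRows_eq_map (step : Int) (N : Nat) : ∀ (M : Nat) (v : Int),
    pvRows step N M v = (List.range M).map (fun k => pvSeq step N (v + ((k * N : Nat) : Int) * step)) := by
  intro M
  induction M with
  | zero => intro v; simp [pvRows]
  | succ M ih =>
    intro v
    rw [List.range_succ_eq_map]
    simp only [pvRows, ih, List.map_cons, List.map_map]
    rw [List.cons_eq_cons]
    refine ⟨by simp, ?_⟩
    apply List.map_congr_left
    intro k _
    simp only [Function.comp]
    congr 1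
    push_cast
    ring

-- B's slice of the flat sequence is the k-th row
theorem pvB_chunk (step : Int) (N M k : Nat) (hk : k < M) (v : Int) :
    ((pvSeq step (M * N) v).drop (k * N)).take N = pvSeq step N (v + ((k * N : Nat) : Int) * step) := by
  have hsplit : M * N = k * N + (N + (M - 1 - k) * N) := by
    have : M = k + (1 + (M - 1 - k)) := by omega
    calc M * N = (k + (1 + (M - 1 - k))) * N := by rw [← this]
    _ = k * N + (N + (M - 1 - k) * N) := by ring
  rw [hsplit, pvSeq_drop, pvSeq_chunk]

-- ===== VERDICT (by name: the statement is the Claim_ definition above) =====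
theorem numMatrix_spec : Claim_equal_numMatrix := by
  intro m n start step _ hpre
  obtain ⟨hm, hn⟩ := hpre
  unfold Spec_numMatrix numMatrix_alt
  rw [if_neg (by omega)]
  simp only []
  rw [pvA_eq_rows m n start step hm hn]
  have hmn : (0:Int) ≤ m * n := mul_nonneg hm.le hn.le
  have hlenflat : (PySem.List.pyRange 0 (m * n) 1).length = (m * n).toNat := by
    rw [PySem.List.length_pyRange_one]; simp
  rw [pvFold_seq, hlenflat]
  simp only [List.nil_append]
  have hmn_toNat : (m * n).toNat = m.toNat * n.toNat := by
    rw [Int.toNat_mul] <;> omega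
  rw [hmn_toNat, pvRows_eq_map, PySem.List.pyRange_one]
  simp only [List.map_map, Int.sub_zero]
  apply List.map_congr_left
  intro k hk
  simp only [Function.comp, zero_add]
  have hkM : k < m.toNat := List.mem_range.mp hk
  have hnc : ((n.toNat : Int)) = n := Int.toNat_of_nonneg hn.le
  have h1 : (k : Int) * n = ((k * n.toNat : Nat) : Int) := by push_cast [hnc]; ring
  have h2 : ((k : Int) + 1) * n = ((k * n.toNat + n.toNat : Nat) : Int) := by push_cast [hnc]; ring
  rw [h1, h2, PySem.List.slice_natCast]
  have h3 : k * n.toNat + n.toNat - k * n.toNat = n.toNat := by omega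
  rw [h3]
  exact (pvB_chunk step n.toNat m.toNat k hkM start).symm
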